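-- pv_equiv track=rewrite | github.com/howard-branch/ai-dm | src/ai_dm/game/location_service.py | formation_offsets
-- ===== SOURCE A (Python) =====
-- def formation_offsets(count: int) -> list[tuple[int, int]]:
--     """Return ``count`` distinct (dx, dy) offsets in *grid cells*
--     suitable for laying out a party of ``count`` tokens around a
--     destination. Index 0 is the centre (the lead PC), the rest
--     spiral outward in a ring pattern so no two slots collide.
--     """
--     if count <= 0:
--         return []
--     # Hand-tuned ring expansion: centre, then the 8 neighbours,
--     # then the 16 next-ring cells. Covers parties up to 25 with
--     # no collisions; beyond that we fall back to a generated
--     # ring further out.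
--     ring = [
--         (0, 0),
--         (1, 0), (-1, 0), (0, 1), (0, -1),
--         (1, 1), (-1, 1), (1, -1), (-1, -1),
--         (2, 0), (-2, 0), (0, 2), (0, -2),
--         (2, 1), (-2, 1), (2, -1), (-2, -1),
--         (1, 2), (-1, 2), (1, -2), (-1, -2),
--         (2, 2), (-2, 2), (2, -2), (-2, -2),
--     ]
--     out = list(ring[: count])
--     # Generate further rings if a freakishly-large party shows up.
--     r = 3
--     while len(out) < count:
--         for i in range(-r, r + 1):
--             for j in range(-r, r + 1):
--                 if abs(i) == r or abs(j) == r: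
--                     out.append((i, j))
--                     if len(out) >= count:
--                         break
--             if len(out) >= count:
--                 break
--         r += 1
--     return out[:count]
-- ===== SOURCE B (Python) =====
-- def formation_offsets(count: int) -> list[tuple[int, int]]:
--     """Same offsets as A, but each ring's boundary cells are generated
--     directly (top row, side pairs, bottom row) instead of scanning the
--     whole (2r+1)^2 square and filtering for boundary cells."""
--     if count <= 0:
--         return []
--     out = [
--         (0, 0),
--         (1, 0), (-1, 0), (0, 1), (0, -1),
--         (1, 1), (-1, 1), (1, -1), (-1, -1),
--         (2, 0), (-2, 0), (0, 2), (0, -2),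
--         (2, 1), (-2, 1), (2, -1), (-2, -1),
--         (1, 2), (-1, 2), (1, -2), (-1, -2),
--         (2, 2), (-2, 2), (2, -2), (-2, -2),
--     ][:count]
--     r = 3
--     while len(out) < count:
--         # left column (i = -r): every j
--         out.extend((-r, j) for j in range(-r, r + 1))
--         # middle rows: only the two boundary cells
--         for i in range(-r + 1, r):
--             out.append((i, -r))
--             out.append((i, r))
--         # right column (i = r): every j
--         out.extend((r, j) for j in range(-r, r + 1))
--         r += 1
--     return out[:count]
-- ===== Notes on version B (the rewrite author's own statement) =====
-- stated objective: faster
-- what changed: Each outer ring is emitted by generating only its boundary cells directly (left column, two side cells per middle row, right column) in the same order, instead of scanning all (2r+1)^2 cells of the square and filtering for boundary cells.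
import Mathlib
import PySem

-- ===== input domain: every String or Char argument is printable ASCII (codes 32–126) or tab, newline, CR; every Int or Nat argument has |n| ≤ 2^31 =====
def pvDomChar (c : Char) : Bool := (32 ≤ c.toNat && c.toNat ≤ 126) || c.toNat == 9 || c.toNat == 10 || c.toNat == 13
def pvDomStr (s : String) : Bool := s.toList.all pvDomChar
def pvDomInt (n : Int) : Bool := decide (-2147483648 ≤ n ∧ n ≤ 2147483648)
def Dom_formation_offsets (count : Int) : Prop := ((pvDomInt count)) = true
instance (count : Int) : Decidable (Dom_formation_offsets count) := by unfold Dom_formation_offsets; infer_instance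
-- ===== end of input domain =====

-- B generates each outer ring's boundary cells directly (left column, two side
-- cells per middle row, right column) in A's order instead of scanning the whole
-- (2r+1)^2 square and filtering; objective: faster (asymptotic, O(count^1.5) → O(count)).

-- ===== PORT A =====
-- the hand-tuned 25-cell table (a shared literal: both Pythons contain it verbatim)
def pvRing : List (Int × Int) :=
  [ (0, 0),
    (1, 0), (-1, 0), (0, 1), (0, -1),
    (1, 1), (-1, 1), (1, -1), (-1, -1),
    (2, 0), (-2, 0), (0, 2), (0, -2),
    (2, 1), (-2, 1), (2, -1), (-2, -1),
    (1, 2), (-1, 2), (1, -2), (-1, -2),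
    (2, 2), (-2, 2), (2, -2), (-2, -2) ]

-- inner 'for j' loop of A: the Bool is the 'break' flag of the inner loop
def pvAInner (count r i : Int) (st : List (Int × Int) × Bool) : List (Int × Int) × Bool :=
  (PySem.List.pyRange (-r) (r + 1) 1).foldl
    (fun s j =>
      if s.2 then s
      else if |i| = r ∨ |j| = r then
        let out := s.1 ++ [(i, j)]
        (out, decide (count ≤ (out.length : Int)))
      else s) st

-- one pass of A's outer 'for i' loop (the body of the while loop); the Bool is the outer break
def pvAPass (count r : Int) (out : List (Int × Int)) : List (Int × Int) :=
  ((PySem.List.pyRange (-r) (r + 1) 1).foldl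
    (fun st i =>
      if st.2 then st
      else
        let st2 := pvAInner count r i st
        (st2.1, decide (count ≤ (st2.1.length : Int)))) (out, false)).1

-- A's while loop. fuel = count.toNat never runs out: each pass appends at least one
-- cell while len(out) < count (the r=3 ring onward is nonempty), so at most
-- count - 1 < count.toNat iterations happen.
def pvALoop (count : Int) : Nat → Int → List (Int × Int) → List (Int × Int)
  | 0, _, out => out
  | fuel + 1, r, out =>
      if (out.length : Int) < count then pvALoop count fuel (r + 1) (pvAPass count r out)
      else out

def formation_offsets (count : Int) : List (Int × Int) :=
  if count ≤ 0 then []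
  else
    let out := PySem.List.slice pvRing none (some count)   -- ring[:count]
    let out := pvALoop count count.toNat 3 out
    PySem.List.slice out none (some count)                 -- out[:count]

-- ===== PORT B =====
-- the boundary of the ring at radius r, generated directly: left column, the two
-- side cells of each middle row, right column
def pvBRing (r : Int) : List (Int × Int) :=
  (PySem.List.pyRange (-r) (r + 1) 1).map (fun j => (-r, j))
    ++ (PySem.List.pyRange (-r + 1) r 1).flatMap (fun i => [(i, -r), (i, r)])
    ++ (PySem.List.pyRange (-r) (r + 1) 1).map (fun j => (r, j))

-- B's while loop (same fuel argument as A's: each iteration grows out)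
def pvBLoop (count : Int) : Nat → Int → List (Int × Int) → List (Int × Int)
  | 0, _, out => out
  | fuel + 1, r, out =>
      if (out.length : Int) < count then pvBLoop count fuel (r + 1) (out ++ pvBRing r)
      else out

def formation_offsets_alt (count : Int) : List (Int × Int) :=
  if count ≤ 0 then []
  else
    PySem.List.slice
      (pvBLoop count count.toNat 3 (PySem.List.slice pvRing none (some count)))
      none (some count)

-- ===== PRECONDITION & SPEC =====
def Spec_formation_offsets (count : Int) (out : List (Int × Int)) : Prop := out = formation_offsets_alt count
instance (count : Int) (out : List (Int × Int)) : Decidable (Spec_formation_offsets count out) := by unfold Spec_formation_offsets; infer_instance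

-- ===== CLAIM (what is proved, stated in full; the proofs are below) =====
def Claim_equal_formation_offsets : Prop := ∀ (count : Int), Dom_formation_offsets count → Spec_formation_offsets count (formation_offsets count)

-- ===== LEMMAS AND PROOFS =====

-- abstract 'append one element, break when len(out) >= count' step
def pvBrk (count : Int) (s : List (Int × Int) × Bool) (c : Int × Int) : List (Int × Int) × Bool :=
  if s.2 then s else
    let o := s.1 ++ [c]
    (o, decide (count ≤ (o.length : Int)))

-- A's boundary cells of ring r, in A's scan order (proof-side characterisation)
def pvCand (r i : Int) : List (Int × Int) :=
  ((PySem.List.pyRange (-r) (r + 1) 1).filter (fun j => |i| = r ∨ |j| = r)).map (fun j => (i, j))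

def pvBdyA (r : Int) : List (Int × Int) :=
  (PySem.List.pyRange (-r) (r + 1) 1).flatMap (pvCand r)

-- a broken fold is inert
lemma pvBrk_absorb (count : Int) (o : List (Int × Int)) (l : List (Int × Int)) :
    l.foldl (pvBrk count) (o, true) = (o, true) := by
  induction l with
  | nil => rfl
  | cons c cs ih => simpa [pvBrk] using ih

-- the inner loop is the break-fold over the filtered, paired candidates
lemma pvAInner_eq_brk (count r i : Int) (st : List (Int × Int) × Bool) :
    pvAInner count r i st = (pvCand r i).foldl (pvBrk count) st := by
  unfold pvAInner pvCand
  generalize PySem.List.pyRange (-r) (r + 1) 1 = l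
  induction l generalizing st with
  | nil => rfl
  | cons j js ih =>
      by_cases hp : |i| = r ∨ |j| = r
      · rw [List.foldl_cons, List.filter_cons_of_pos (by simpa using hp), List.map_cons,
          List.foldl_cons, ← ih]
        congr 1
        by_cases hb : st.2 <;> simp [pvBrk, hp, hb]
      · rw [List.foldl_cons, List.filter_cons_of_neg (by simpa using hp), ← ih]
        congr 1
        by_cases hb : st.2 <;> simp [hp, hb]

-- characterisation of the break-fold: it appends a prefix, truncated at count
lemma pvBrk_fold (count : Int) (cands : List (Int × Int)) :
    ∀ out : List (Int × Int), (out.length : Int) < count →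
      cands.foldl (pvBrk count) (out, false)
        = ((out ++ cands).take count.toNat,
           decide (count ≤ (out.length : Int) + cands.length)) := by
  induction cands with
  | nil =>
      intro out h
      have h1 : out.length < count.toNat := by omega
      simp [List.take_of_length_le (Nat.le_of_lt h1)]
      omega
  | cons c cs ih =>
      intro out h
      rw [List.foldl_cons]
      have hstep : pvBrk count (out, false) c
          = (out ++ [c], decide (count ≤ ((out ++ [c]).length : Int))) := by
        simp [pvBrk]
      rw [hstep]
      by_cases hfull : count ≤ ((out ++ [c]).length : Int)
      · rw [decide_eq_true hfull, pvBrk_absorb]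
        have hct : count.toNat = out.length + 1 := by simp at hfull; omega
        have h2 : count ≤ (out.length : Int) + (c :: cs).length := by
          simp at hfull ⊢; omega
      
        rw [decide_eq_true h2, show out ++ c :: cs = (out ++ [c]) ++ cs by simp,
          List.take_append_of_le_length (by simp; omega),
          List.take_of_length_le (by simp; omega)]
      · rw [decide_eq_false hfull,
          ih (out ++ [c]) (by simp at hfull ⊢; omega)]
        refine congrArg₂ Prod.mk (by simp) ?_
        rw [decide_eq_decide]
        simp
        omega

-- a broken fold of the 'skip when flag set' shape is inert
lemma pv_foldl_if_absorb {σ ι : Type} (g : σ × Bool → ι → σ × Bool) (l : List ι) (o : σ) :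
    (l.foldl (fun st i => if st.2 = true then st else g st i) (o, true)) = (o, true) := by
  induction l with
  | nil => rfl
  | cons i is ih => simpa using ih

-- one pass of A appends the ring boundary, truncated at count
lemma pvAPass_eq (count r : Int) (out : List (Int × Int)) (h : (out.length : Int) < count) :
    pvAPass count r out = (out ++ pvBdyA r).take count.toNat := by
  unfold pvAPass pvBdyA
  generalize PySem.List.pyRange (-r) (r + 1) 1 = l
  induction l generalizing out with
  | nil =>
      have : out.length < count.toNat := by omega
      simp [List.take_of_length_le (Nat.le_of_lt this)]
  | cons i is ih =>
      rw [List.flatMap_cons, List.foldl_cons,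
        if_neg (show ¬(((out, false) : List (Int × Int) × Bool).2 = true) by simp)]
      simp only []
      rw [pvAInner_eq_brk, pvBrk_fold count (pvCand r i) out h]
      by_cases hfull : count ≤ (out.length : Int) + (pvCand r i).length
      · have h1 : count.toNat ≤ (out ++ pvCand r i).length := by simp; omega
        have h2 : count ≤ (((out ++ pvCand r i).take count.toNat).length : Int) := by
          simp [List.length_take]; omega
        rw [decide_eq_true hfull, decide_eq_true h2, pv_foldl_if_absorb]
        rw [← List.append_assoc, List.take_append_of_le_length h1]
      · have htk : (out ++ pvCand r i).take count.toNat = out ++ pvCand r i := by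
          apply List.take_of_length_le; simp; omega
        have hnot : ¬ count ≤ (((out ++ pvCand r i).take count.toNat).length : Int) := by
          rw [htk]; simp; omega
        rw [decide_eq_false hfull, decide_eq_false hnot, htk]
        rw [ih (out ++ pvCand r i) (by simp; omega)]
        simp [List.append_assoc]

-- A's scan-and-filter boundary equals B's directly generated boundary
lemma pvBdyA_eq_pvBRing (r : Int) (hr : 0 < r) : pvBdyA r = pvBRing r := by
  have habs : |r| = r := abs_of_pos hr
  have habsn : |(-r)| = r := by rw [abs_neg, habs]
  have hfull : ∀ i : Int, |i| = r →
      pvCand r i = (PySem.List.pyRange (-r) (r + 1) 1).map (fun j => (i, j)) := by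
    intro i hi
    unfold pvCand
    rw [List.filter_eq_self.mpr]
    intro j _
    simp [hi]
  have hnotr : ∀ i : Int, -r < i → i < r → ¬ |i| = r := by
    intro i h1 h2 hc
    rcases (abs_eq (le_of_lt hr)).1 hc with h | h <;> omega
  have hmid : ∀ i : Int, -r < i → i < r → pvCand r i = [(i, -r), (i, r)] := by
    intro i h1 h2
    unfold pvCand
    rw [List.filter_congr (q := fun j => decide (|j| = r))
        (fun j _ => by simp [hnotr i h1 h2])]
    rw [PySem.List.pyRange_one_succ_right (by omega : -r ≤ r),
      PySem.List.pyRange_one_cons (by omega : -r < r)]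
    simp only [List.filter_append, List.filter_cons, List.filter_nil]
    rw [List.filter_eq_nil_iff.mpr (fun j hj => by
      have hb := (PySem.List.mem_pyRange_one.1 hj)
      simp [hnotr j (by omega) (by omega)])]
    simp [habsn, habs]
  unfold pvBdyA
  rw [PySem.List.pyRange_one_succ_right (by omega : -r ≤ r),
    PySem.List.pyRange_one_cons (by omega : -r < r)]
  simp only [List.flatMap_append, List.flatMap_cons, List.flatMap_nil, List.append_nil]
  rw [hfull _ habsn, hfull _ habs,
    List.flatMap_congr (g := fun i => [(i, -r), (i, r)])
      (fun i hi => hmid i (by have := (PySem.List.mem_pyRange_one.1 hi); omega)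
        (by have := (PySem.List.mem_pyRange_one.1 hi); omega))]
  unfold pvBRing
  simp [List.append_assoc]

-- take n (take n l₁ ++ l₂) = take n (l₁ ++ l₂)
lemma pv_take_append_take (n : Nat) (l₁ l₂ : List (Int × Int)) :
    (l₁.take n ++ l₂).take n = (l₁ ++ l₂).take n := by
  rw [List.take_append, List.take_append, List.take_take]
  simp [List.length_take]
  by_cases hl : l₁.length ≤ n
  · rw [Nat.min_eq_right hl]
  · have h2 := Nat.le_of_not_le hl
    rw [Nat.min_eq_left h2, Nat.sub_eq_zero_of_le h2, Nat.sub_self]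

-- the two while loops agree under truncation at count
lemma pvLoop_eq (count : Int) (hc : 0 < count) :
    ∀ (fuel : Nat) (r : Int), 0 < r → ∀ w : List (Int × Int),
      pvALoop count fuel r (w.take count.toNat) = (pvBLoop count fuel r w).take count.toNat := by
  intro fuel
  induction fuel with
  | zero => intro r _ w; rfl
  | succ n ih =>
      intro r hr w
      have hct : (count.toNat : Int) = count := Int.toNat_of_nonneg (le_of_lt hc)
      by_cases h : (w.length : Int) < count
      · have hA : ((w.take count.toNat).length : Int) < count := by
          simp [List.length_take]; omega
        rw [pvALoop, pvBLoop, if_pos hA, if_pos h,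
          pvAPass_eq count r _ hA, pv_take_append_take, pvBdyA_eq_pvBRing r hr]
        exact ih (r + 1) (by omega) (w ++ pvBRing r)
      · have hA : ¬ ((w.take count.toNat).length : Int) < count := by
          simp [List.length_take]; omega
        rw [pvALoop, pvBLoop, if_neg hA, if_neg h]

-- ===== VERDICT (by name: the statement is the Claim_ definition above) =====
theorem formation_offsets_spec : Claim_equal_formation_offsets := by
  intro count _
  unfold Spec_formation_offsets formation_offsets formation_offsets_alt
  by_cases hc : count ≤ 0
  · simp [hc]
  · have hc' : 0 < count := by omega
    simp only [hc]
    rw [PySem.List.slice_to _ (le_of_lt hc'), PySem.List.slice_to _ (le_of_lt hc'),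
      PySem.List.slice_to _ (le_of_lt hc')]
    have h0 : pvRing.take count.toNat = (pvRing.take count.toNat).take count.toNat := by
      rw [List.take_take]; simp
    rw [h0, pvLoop_eq count hc' count.toNat 3 (by norm_num), List.take_take,
      Nat.min_self, ← h0]
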